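-- pv_equiv track=rewrite | github.com/timurua/radiozilla | backend/pywebscraper/pywebscraper/url_normalize.py | remove_dot_segments
-- ===== SOURCE A (Python) =====
-- def remove_dot_segments(path: str) -> str:
--     """Remove dot-segments from path as per RFC 3986 Section 5.2.4"""
--     segments = path.split('/')
--     output: list[str] = []
--     for segment in segments:
--         if segment == '..':
--             if output:
--                 output.pop()
--         elif segment != '.' and segment != '':
--             output.append(segment)
--     return '/' + '/'.join(output)
-- ===== SOURCE B (Python) =====
-- def remove_dot_segments(path: str) -> str:
--     """Remove dot-segments from path as per RFC 3986 Section 5.2.4"""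
--     pending = 0   # '..' segments seen (to the right) not yet cancelled
--     res = ''      # resolved path built back-to-front, each kept segment as '/seg'
--     for segment in reversed(path.split('/')):
--         if segment == '..':
--             pending += 1
--         elif segment == '' or segment == '.':
--             continue
--         elif pending:
--             pending -= 1
--         else:
--             res = '/' + segment + res
--     return res if res else '/'
-- ===== Notes on version B (the rewrite author's own statement) =====
-- stated objective: alternative
-- what changed: Replaces the left-to-right stack (append/pop/join) scan with a single right-to-left pass that keeps an integer counter of pending '..' segments and builds the result string directly back-to-front by prepending '/segment', so there is no stack, no pop and no final join.
import Mathlib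
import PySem

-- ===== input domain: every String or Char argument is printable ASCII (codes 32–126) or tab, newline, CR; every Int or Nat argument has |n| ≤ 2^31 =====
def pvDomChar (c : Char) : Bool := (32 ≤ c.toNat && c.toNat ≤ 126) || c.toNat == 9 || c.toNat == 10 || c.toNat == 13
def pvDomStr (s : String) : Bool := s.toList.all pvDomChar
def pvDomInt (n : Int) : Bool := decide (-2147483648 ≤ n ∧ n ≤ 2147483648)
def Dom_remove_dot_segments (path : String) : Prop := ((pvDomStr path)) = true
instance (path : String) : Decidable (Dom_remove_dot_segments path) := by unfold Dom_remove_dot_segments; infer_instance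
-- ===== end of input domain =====

-- B replaces A's left-to-right stack scan (append/pop, final join) by a single right-to-left
-- pass with a counter of pending '..' segments that builds the result string directly
-- back-to-front (objective: alternative decomposition, same cost).

-- ===== PORT A =====
def remove_dot_segments (path : String) : String :=
  let segments := (PySem.Str.split? path "/").getD []   -- sep "/" ≠ "" so split? is always some
  let output : List String := segments.foldl
    (fun out seg =>
      if seg == ".." then out.dropLast          -- 'if output: output.pop()' (dropLast [] = [])
      else if seg != "." && seg != "" then out ++ [seg]
      else out)
    []
  "/" ++ PySem.Str.join "/" output

-- ===== PORT B =====
def remove_dot_segments_alt (path : String) : String :=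
  let st : Nat × String := ((PySem.Str.split? path "/").getD []).reverse.foldl
    (fun st segment =>                                  -- 'for segment in reversed(path.split("/"))'
      if segment == ".." then (st.1 + 1, st.2)
      else if segment == "" || segment == "." then st
      else if st.1 != 0 then (st.1 - 1, st.2)
      else (st.1, "/" ++ segment ++ st.2))              -- res = '/' + segment + res
    (0, "")
  if st.2 != "" then st.2 else "/"                      -- 'return res if res else "/"'

-- ===== PRECONDITION & SPEC =====
def Spec_remove_dot_segments (path : String) (out : String) : Prop := out = remove_dot_segments_alt path
instance (path : String) (out : String) : Decidable (Spec_remove_dot_segments path out) := by unfold Spec_remove_dot_segments; infer_instance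

-- ===== CLAIM (what is proved, stated in full; the proofs are below) =====
def Claim_equal_remove_dot_segments : Prop := ∀ (path : String), Dom_remove_dot_segments path → Spec_remove_dot_segments path (remove_dot_segments path)

-- ===== LEMMAS AND PROOFS =====

/-- A's loop body (named copy of the lambda in `remove_dot_segments`). -/
def pvStepA (out : List String) (seg : String) : List String :=
  if seg == ".." then out.dropLast
  else if seg != "." && seg != "" then out ++ [seg]
  else out

/-- B's loop body (named copy of the lambda in `remove_dot_segments_alt`). -/
def pvStepS (st : Nat × String) (seg : String) : Nat × String :=
  if seg == ".." then (st.1 + 1, st.2)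
  else if seg == "" || seg == "." then st
  else if st.1 != 0 then (st.1 - 1, st.2)
  else (st.1, "/" ++ seg ++ st.2)

/-- List-level model of B's right-to-left pass: pending '..' count and kept segments. -/
def pvResolve : List String → Nat × List String
  | [] => (0, [])
  | seg :: rest =>
    let p := pvResolve rest
    if seg = ".." then (p.1 + 1, p.2)
    else if seg = "" ∨ seg = "." then p
    else if p.1 ≠ 0 then (p.1 - 1, p.2)
    else (p.1, seg :: p.2)

/-- Render a segment list as B renders it: each segment prefixed by '/'. -/
def pvRender : List String → String
  | [] => ""
  | s :: rest => "/" ++ s ++ pvRender rest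

/-- drop the last `k` elements -/
def pvDropN : Nat → List String → List String
  | 0, l => l
  | k + 1, l => pvDropN k l.dropLast

theorem pvDropN_nil (k : Nat) : pvDropN k [] = [] := by
  induction k with
  | zero => rfl
  | succ k ih => simpa [pvDropN] using ih

/-- B's string-state fold is `pvResolve` with the kept list rendered. -/
theorem pv_fold_resolve (segs : List String) :
    segs.foldr (fun seg st => pvStepS st seg) ((0, "") : Nat × String)
      = ((pvResolve segs).1, pvRender (pvResolve segs).2) := by
  induction segs with
  | nil => rfl
  | cons s rest ih =>
    rw [List.foldr_cons, ih]
    by_cases hdd : s = ".."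
    · subst hdd; rfl
    · by_cases hsk : s = "" ∨ s = "."
      · have h2 : (s == "" || s == ".") = true := by
          rcases hsk with h | h <;> simp [h]
        simp [pvStepS, pvResolve, hdd, h2, hsk]
      · push Not at hsk
        by_cases hz : (pvResolve rest).1 = 0
        · simp [pvStepS, pvResolve, hdd, hsk.1, hsk.2, hz, pvRender]
        · simp [pvStepS, pvResolve, hdd, hsk.1, hsk.2, hz]

/-- A's stack fold over `segs` starting from stack `st` equals: drop from `st` as many
trailing elements as `pvResolve` leaves pending, then append the kept segments. -/
theorem pv_main (segs : List String) (st : List String) :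
    segs.foldl pvStepA st = pvDropN (pvResolve segs).1 st ++ (pvResolve segs).2 := by
  induction segs generalizing st with
  | nil => simp [pvResolve, pvDropN]
  | cons s rest ih =>
    by_cases hdd : s = ".."
    · subst hdd
      rw [List.foldl_cons, show pvStepA st ".." = st.dropLast from rfl, ih]
      rfl
    · by_cases hsk : s = "" ∨ s = "."
      · have hA : pvStepA st s = st := by rcases hsk with h | h <;> subst h <;> rfl
        rw [List.foldl_cons, hA, ih]
        simp [pvResolve, hdd, hsk]
      · push Not at hsk
        have hA : pvStepA st s = st ++ [s] := by simp [pvStepA, hdd, hsk.1, hsk.2]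
        have hR : pvResolve (s :: rest)
            = if (pvResolve rest).1 ≠ 0 then ((pvResolve rest).1 - 1, (pvResolve rest).2)
              else ((pvResolve rest).1, s :: (pvResolve rest).2) := by
          simp [pvResolve, hdd, hsk.1, hsk.2]
        rw [List.foldl_cons, hA, ih, hR]
        rcases hk : (pvResolve rest).1 with _ | j
        · simp [pvDropN]
        · have hdrop : pvDropN (j + 1) (st ++ [s]) = pvDropN j st := by
            simp [pvDropN]
          simp [hdrop]

/-- Rendering a nonempty kept list agrees with A's '"/" ++ join'. -/
theorem pv_render_join (s : String) (K : List String) :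
    "/" ++ PySem.Str.join "/" (s :: K) = pvRender (s :: K) := by
  apply String.toList_inj.mp
  simp only [String.toList_append, PySem.Str.toList_join]
  induction K generalizing s with
  | nil => simp [PySem.Chars.join, List.intercalate, pvRender]
  | cons t rest ih =>
    have h := ih t
    simp only [List.map_cons] at h ⊢
    rw [PySem.Chars.join_cons_cons]
    simp only [pvRender, String.toList_append] at h ⊢
    rw [← h]
    simp [List.append_assoc]

theorem pv_render_ne (s : String) (K : List String) : pvRender (s :: K) ≠ "" := by
  intro h
  have := congrArg String.toList h
  simp [pvRender] at this

/-- The whole pipeline, stated over an arbitrary segment list. -/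
theorem pv_pipeline (segs : List String) :
    "/" ++ PySem.Str.join "/" (segs.foldl pvStepA [])
      = (let st := segs.reverse.foldl pvStepS ((0, "") : Nat × String);
         if st.2 != "" then st.2 else "/") := by
  rw [List.foldl_reverse, show (fun (x : String) (y : Nat × String) => pvStepS y x)
      = (fun x y => (fun seg st => pvStepS st seg) x y) from rfl,
    pv_fold_resolve, pv_main, pvDropN_nil, List.nil_append]
  rcases hK : (pvResolve segs).2 with _ | ⟨s, K⟩
  · have : "/" ++ PySem.Str.join "/" ([] : List String) = "/" := by
      apply String.toList_inj.mp
      simp [PySem.Str.toList_join, PySem.Chars.join, List.intercalate]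
    simp [pvRender, this]
  · have hne := pv_render_ne s K
    simp only [pv_render_join]
    simp [hne]

-- ===== VERDICT (by name: the statement is the Claim_ definition above) =====
theorem remove_dot_segments_spec : Claim_equal_remove_dot_segments := by
  intro path _
  have hA : (fun (out : List String) (seg : String) =>
      if seg == ".." then out.dropLast
      else if seg != "." && seg != "" then out ++ [seg]
      else out) = pvStepA := rfl
  have hB : (fun (st : Nat × String) (seg : String) =>
      if seg == ".." then (st.1 + 1, st.2)
      else if seg == "" || seg == "." then st
      else if st.1 != 0 then (st.1 - 1, st.2)
      else (st.1, "/" ++ seg ++ st.2)) = pvStepS := rfl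
  unfold Spec_remove_dot_segments remove_dot_segments remove_dot_segments_alt
  rw [hA, hB]
  exact pv_pipeline ((PySem.Str.split? path "/").getD [])
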